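-- pv_equiv track=rewrite | github.com/yacoublambaz/EECE230PssSpring2022 | apr5th.py | numMem
-- ===== SOURCE A (Python) =====
-- def numMem(h):
--     def num(h,L):
--         #1. Is this a problem that I solved before?
--         if L[h] != -1:
--             return L[h]
--         #2. Is this a base case?
--         if h == 0:
--             return 1
--         if h == 1:
--             return 3
--         #3. Else, solve it and store it for me
--         L[h] = num(h-1,L)*num(h-1,L) + 2*num(h-2,L)*num(h-1,L)
--         return L[h]
--     L = [-1 for i in range(h+1)]
--     return num(h,L)
-- ===== SOURCE B (Python) =====
-- def numMem(h):
--     L = [-1] * (h + 1)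
--     for i in range(h + 1):
--         if i == 0:
--             L[i] = 1
--         elif i == 1:
--             L[i] = 3
--         else:
--             L[i] = L[i-1] * L[i-1] + 2 * L[i-2] * L[i-1]
--     return L[h]
-- ===== Notes on version B (the rewrite author's own statement) =====
-- stated objective: simpler
-- what changed: Replaces the memoized recursive helper with a bottom-up iterative table fill of the same recurrence.
import Mathlib
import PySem

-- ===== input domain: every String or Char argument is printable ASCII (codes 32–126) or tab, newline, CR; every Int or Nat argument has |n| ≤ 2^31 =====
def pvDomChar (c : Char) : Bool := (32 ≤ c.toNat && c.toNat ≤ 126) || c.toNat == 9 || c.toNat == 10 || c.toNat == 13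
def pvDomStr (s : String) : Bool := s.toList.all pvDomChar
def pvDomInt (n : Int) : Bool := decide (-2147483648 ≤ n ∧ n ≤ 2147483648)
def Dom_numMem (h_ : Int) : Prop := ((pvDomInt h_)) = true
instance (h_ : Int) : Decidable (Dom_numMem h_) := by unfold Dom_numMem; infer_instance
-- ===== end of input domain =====

-- B replaces A's memoized recursion by a bottom-up iterative table fill (simpler); return-value equivalence for h ≥ 0.

-- ===== PORT A =====
-- A's inner `num(h,L)`: the memo list is threaded explicitly (Python mutates L in place).
-- Index h is a Nat here; exact for h ≥ 0 (Pre_): Python raises IndexError for negative h.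
def numAuxA : Nat → List Int → Int × List Int
  | h, L =>
    let v := L.getD h (-1)            -- L[h]; always in range inside Pre_
    if v ≠ -1 then (v, L)
    else
      match h with
      | 0 => (1, L)
      | 1 => (3, L)
      | n+2 =>
        let p1 := numAuxA (n+1) L
        let p2 := numAuxA (n+1) p1.2
        let p3 := numAuxA n p2.2
        let p4 := numAuxA (n+1) p3.2
        let L' := p4.2.set (n+2) (p1.1 * p2.1 + 2 * p3.1 * p4.1)   -- L[h] = ...
        (L'.getD (n+2) (-1), L')                                    -- return L[h]

def numMem (h_ : Int) : Int :=
  (numAuxA h_.toNat (List.replicate (h_ + 1).toNat (-1))).1   -- L = [-1 for i in range(h+1)]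

-- ===== PORT B =====
-- loop body of B's `for i in range(h+1)`
def bStep (L : List Int) (i : Nat) : List Int :=
  if i = 0 then L.set i 1
  else if i = 1 then L.set i 3
  else L.set i (L.getD (i-1) (-1) * L.getD (i-1) (-1) + 2 * L.getD (i-2) (-1) * L.getD (i-1) (-1))

def numMem_alt (h_ : Int) : Int :=
  let n := (h_ + 1).toNat                                   -- range(h+1) has this many elements (exact: empty for h < 0)
  let L := (List.range n).foldl bStep (List.replicate n (-1))
  L.getD h_.toNat 0                                          -- return L[h]; in range for h ≥ 0 (Pre_), Python raises otherwise

-- ===== PRECONDITION & SPEC =====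
-- Pre_ excludes exactly h < 0, on which both Pythons raise IndexError (empty memo list).
def Pre_numMem (h_ : Int) : Prop := 0 ≤ h_
instance (h_ : Int) : Decidable (Pre_numMem h_) := by unfold Pre_numMem; infer_instance
def pvWitness_numMem : Int := (3)

def Spec_numMem (h_ : Int) (out : Int) : Prop := out = numMem_alt h_
instance (h_ : Int) (out : Int) : Decidable (Spec_numMem h_ out) := by unfold Spec_numMem; infer_instance

-- ===== CLAIM (what is proved, stated in full; the proofs are below) =====
def Claim_equal_numMem : Prop := ∀ (h_ : Int), Dom_numMem h_ → Pre_numMem h_ → Spec_numMem h_ (numMem h_)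

-- ===== LEMMAS AND PROOFS =====

-- the mathematical recurrence both programs compute
def fRec : Nat → Int
  | 0 => 1
  | 1 => 3
  | n+2 => fRec (n+1) * fRec (n+1) + 2 * fRec n * fRec (n+1)

-- memo-list invariant: every cell is either unfilled (-1) or the correct value
def InvA (L : List Int) : Prop := ∀ i, i < L.length → L.getD i (-1) = -1 ∨ L.getD i (-1) = fRec i

theorem getD_set_self (L : List Int) (i : Nat) (a d : Int) (h : i < L.length) :
    (L.set i a).getD i d = a := by
  simp [List.getD_eq_getElem?_getD, h]

theorem getD_set_ne (L : List Int) (i j : Nat) (a d : Int) (h : i ≠ j) :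
    (L.set i a).getD j d = L.getD j d := by
  simp [List.getD_eq_getElem?_getD, List.getElem?_set_ne h]

theorem numAuxA_zero (L : List Int) :
    numAuxA 0 L = if L.getD 0 (-1) ≠ -1 then (L.getD 0 (-1), L) else (1, L) := rfl

theorem numAuxA_one (L : List Int) :
    numAuxA 1 L = if L.getD 1 (-1) ≠ -1 then (L.getD 1 (-1), L) else (3, L) := rfl

theorem numAuxA_succ_succ (n : Nat) (L : List Int) :
    numAuxA (n+2) L =
      if L.getD (n+2) (-1) ≠ -1 then (L.getD (n+2) (-1), L)
      else
        ((((numAuxA (n+1) (numAuxA n (numAuxA (n+1) (numAuxA (n+1) L).2).2).2).2).set (n+2)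
            ((numAuxA (n+1) L).1 * (numAuxA (n+1) (numAuxA (n+1) L).2).1 +
              2 * (numAuxA n (numAuxA (n+1) (numAuxA (n+1) L).2).2).1 *
                (numAuxA (n+1) (numAuxA n (numAuxA (n+1) (numAuxA (n+1) L).2).2).2).1)).getD (n+2) (-1),
          ((numAuxA (n+1) (numAuxA n (numAuxA (n+1) (numAuxA (n+1) L).2).2).2).2).set (n+2)
            ((numAuxA (n+1) L).1 * (numAuxA (n+1) (numAuxA (n+1) L).2).1 +
              2 * (numAuxA n (numAuxA (n+1) (numAuxA (n+1) L).2).2).1 *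
                (numAuxA (n+1) (numAuxA n (numAuxA (n+1) (numAuxA (n+1) L).2).2).2).1)) := rfl

theorem numAuxA_correct : ∀ (h : Nat) (L : List Int), h < L.length → InvA L →
    (numAuxA h L).1 = fRec h ∧ (numAuxA h L).2.length = L.length ∧ InvA (numAuxA h L).2 := by
  intro h
  induction h using Nat.strong_induction_on with
  | _ h IH =>
    intro L hlen hinv
    have hmem : L.getD h (-1) ≠ -1 → L.getD h (-1) = fRec h := by
      intro hv; rcases hinv h hlen with h1 | h1
      · exact absurd h1 hv
      · exact h1
    match h with
    | 0 =>
      rw [numAuxA_zero]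
      by_cases hv : L.getD 0 (-1) ≠ -1
      · rw [if_pos hv]; exact ⟨hmem hv, rfl, hinv⟩
      · rw [if_neg hv]; exact ⟨rfl, rfl, hinv⟩
    | 1 =>
      rw [numAuxA_one]
      by_cases hv : L.getD 1 (-1) ≠ -1
      · rw [if_pos hv]; exact ⟨hmem hv, rfl, hinv⟩
      · rw [if_neg hv]; exact ⟨rfl, rfl, hinv⟩
    | n+2 =>
      rw [numAuxA_succ_succ]
      by_cases hv : L.getD (n+2) (-1) ≠ -1
      · rw [if_pos hv]; exact ⟨hmem hv, rfl, hinv⟩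
      · rw [if_neg hv]
        obtain ⟨e1, l1, i1⟩ := IH (n+1) (by omega) L (by omega) hinv
        obtain ⟨e2, l2, i2⟩ := IH (n+1) (by omega) (numAuxA (n+1) L).2 (by omega) i1
        obtain ⟨e3, l3, i3⟩ := IH n (by omega) _ (by omega) i2
        obtain ⟨e4, l4, i4⟩ := IH (n+1) (by omega) _ (by omega) i3
        set L4 := (numAuxA (n+1) (numAuxA n (numAuxA (n+1) (numAuxA (n+1) L).2).2).2).2 with hL4
        set r := (numAuxA (n+1) L).1 * (numAuxA (n+1) (numAuxA (n+1) L).2).1 +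
            2 * (numAuxA n (numAuxA (n+1) (numAuxA (n+1) L).2).2).1 *
            (numAuxA (n+1) (numAuxA n (numAuxA (n+1) (numAuxA (n+1) L).2).2).2).1 with hr
        have hlen4 : L4.length = L.length := by omega
        have hrf : r = fRec (n+2) := by rw [hr, e1, e2, e3, e4]; rfl
        have hget : (L4.set (n+2) r).getD (n+2) (-1) = r := getD_set_self _ _ _ _ (by omega)
        refine ⟨by rw [hget, hrf], by simp [hlen4], ?_⟩
        intro i hi
        simp only [List.length_set] at hi
        by_cases hne : n + 2 = i
        · subst hne
          right; rw [getD_set_self _ _ _ _ (by omega), hrf]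
        · rw [getD_set_ne _ _ _ _ _ hne]
          exact i4 i (by omega)

theorem bFold_correct : ∀ (n k : Nat), k ≤ n →
    ((List.range k).foldl bStep (List.replicate n (-1))).length = n ∧
    (∀ i, i < k → ((List.range k).foldl bStep (List.replicate n (-1))).getD i 0 = fRec i) := by
  intro n k
  induction k with
  | zero => intro _; simp
  | succ k ih =>
    intro hk
    obtain ⟨hl, hv⟩ := ih (by omega)
    set P := (List.range k).foldl bStep (List.replicate n (-1)) with hP
    have hstep : (List.range (k+1)).foldl bStep (List.replicate n (-1)) = bStep P k := by
      rw [List.range_succ, List.foldl_append]; rfl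
    have hkn : k < n := by omega
    have hPk : k < P.length := by omega
    -- value written at index k equals fRec k
    have hval : (bStep P k).getD k 0 = fRec k := by
      unfold bStep
      match k with
      | 0 => rw [if_pos rfl]; exact getD_set_self P 0 1 0 hPk
      | 1 => rw [if_neg one_ne_zero, if_pos rfl, getD_set_self P 1 3 0 hPk]; rfl
      | m+2 =>
        rw [if_neg (by omega), if_neg (by omega), getD_set_self P (m+2) _ 0 hPk]
        simp only [show m+2-1 = m+1 from rfl, show m+2-2 = m from rfl]
        have g1 : P.getD (m+1) (-1) = fRec (m+1) := by
          rw [List.getD_eq_getElem?_getD, List.getElem?_eq_getElem (by omega)]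
          have := hv (m+1) (by omega)
          rw [List.getD_eq_getElem?_getD, List.getElem?_eq_getElem (by omega)] at this
          simpa using this
        have g2 : P.getD m (-1) = fRec m := by
          rw [List.getD_eq_getElem?_getD, List.getElem?_eq_getElem (by omega)]
          have := hv m (by omega)
          rw [List.getD_eq_getElem?_getD, List.getElem?_eq_getElem (by omega)] at this
          simpa using this
        rw [g1, g2, fRec]
    have hlen' : (bStep P k).length = n := by
      unfold bStep; split_ifs <;> simp [hl]
    refine ⟨by rw [hstep]; exact hlen', ?_⟩
    intro i hi
    rw [hstep]
    by_cases hik : i = k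
    · subst hik; exact hval
    · have : (bStep P k).getD i 0 = P.getD i 0 := by
        unfold bStep; split_ifs with h0 h1
        · subst h0; exact getD_set_ne P _ _ _ _ (by omega)
        · subst h1; exact getD_set_ne P _ _ _ _ (by omega)
        · exact getD_set_ne P _ _ _ _ (by omega)
      rw [this]; exact hv i (by omega)

-- ===== VERDICT (by name: the statement is the Claim_ definition above) =====
theorem numMem_spec : Claim_equal_numMem := by
  intro h_ _ hpre
  unfold Spec_numMem numMem numMem_alt
  have hpre' : (0:Int) ≤ h_ := hpre
  have hn : (h_ + 1).toNat = h_.toNat + 1 := by omega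
  set n := h_.toNat with hdef
  rw [hn]
  have hinv : InvA (List.replicate (n+1) (-1 : Int)) := by
    intro i hi
    left
    simp only [List.length_replicate] at hi
    rw [List.getD_eq_getElem?_getD, List.getElem?_replicate, if_pos hi]
    rfl
  obtain ⟨hA, _, _⟩ := numAuxA_correct n (List.replicate (n+1) (-1)) (by simp) hinv
  obtain ⟨hl, hB⟩ := bFold_correct (n+1) (n+1) (le_refl _)
  rw [hA, hB n (by omega)]
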